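-- pv_equiv track=rewrite | github.com/natnaeleyuel/leetcode_python_solution_v2 | 2840-check-if-strings-can-be-made-equal-with-operations-ii/2840-check-if-strings-can-be-made-equal-with-operations-ii.py | checkStrings
-- ===== SOURCE A (Python) =====
-- def checkStrings(s1: str, s2: str) -> bool:
--     if s1 == s2:
--         return True
--
--     l1 = [s1[i] for i in range(len(s1)) if i % 2 == 0]
--     l2 = [s1[i] for i in range(len(s1)) if i % 2 == 1]
--     l3 = [s2[i] for i in range(len(s2)) if i % 2 == 0]
--     l4 = [s2[i] for i in range(len(s2)) if i % 2 == 1]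
--     l1.sort()
--     l2.sort()
--     l3.sort()
--     l4.sort()
--
--     if "".join(l1) == "".join(l3):
--         if "".join(l2) == "".join(l4):
--             return True
--
--     return False
-- ===== SOURCE B (Python) =====
-- def checkStrings(s1: str, s2: str) -> bool:
--     # One signed pass per string: net count per (index parity, char) must balance.
--     counts = {}
--     for i, ch in enumerate(s1):
--         k = (i % 2, ch)
--         counts[k] = counts.get(k, 0) + 1
--     for i, ch in enumerate(s2):
--         k = (i % 2, ch)
--         counts[k] = counts.get(k, 0) - 1
--     return all(v == 0 for v in counts.values())
-- ===== Notes on version B (the rewrite author's own statement) =====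
-- stated objective: simpler
-- what changed: Replaces the equality shortcut, four-way index partition and four sorts by a single signed tally dict keyed by (index parity, char): +1 over s1, -1 over s2, then check all balances are zero.
import Mathlib
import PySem

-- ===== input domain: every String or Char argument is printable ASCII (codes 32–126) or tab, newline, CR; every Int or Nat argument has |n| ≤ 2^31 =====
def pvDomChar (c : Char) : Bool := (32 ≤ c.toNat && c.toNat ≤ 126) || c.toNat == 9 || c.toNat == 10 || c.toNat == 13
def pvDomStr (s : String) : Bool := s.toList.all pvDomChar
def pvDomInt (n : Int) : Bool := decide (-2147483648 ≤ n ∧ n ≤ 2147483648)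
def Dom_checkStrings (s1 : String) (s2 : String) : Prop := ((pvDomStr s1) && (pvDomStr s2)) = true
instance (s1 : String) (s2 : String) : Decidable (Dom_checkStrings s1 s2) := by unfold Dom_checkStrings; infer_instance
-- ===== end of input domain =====

-- B replaces A's equality shortcut, four even/odd index partitions and four sorts by one signed
-- tally dict keyed by (index parity, char): +1 over s1, -1 over s2, then all balances must be 0.

-- ===== PORT A =====
-- "".join of lists of single chars are equal exactly when the char lists are equal, so the
-- joined-string comparisons are ported as comparisons of the (sorted) char lists (exact).
def checkStrings (s1 : String) (s2 : String) : Bool :=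
  if s1 == s2 then true
  else
    let t1 := s1.toList
    let t2 := s2.toList
    let l1 := (List.filter (fun i => PySem.Int.mod i 2 == 0) (PySem.List.pyRange 0 (PySem.List.len t1))).map (fun i => PySem.List.pyGetD t1 i ' ')
    let l2 := (List.filter (fun i => PySem.Int.mod i 2 == 1) (PySem.List.pyRange 0 (PySem.List.len t1))).map (fun i => PySem.List.pyGetD t1 i ' ')
    let l3 := (List.filter (fun i => PySem.Int.mod i 2 == 0) (PySem.List.pyRange 0 (PySem.List.len t2))).map (fun i => PySem.List.pyGetD t2 i ' ')
    let l4 := (List.filter (fun i => PySem.Int.mod i 2 == 1) (PySem.List.pyRange 0 (PySem.List.len t2))).map (fun i => PySem.List.pyGetD t2 i ' ')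
    let l1 := PySem.List.sorted l1 (fun x => x) false
    let l2 := PySem.List.sorted l2 (fun x => x) false
    let l3 := PySem.List.sorted l3 (fun x => x) false
    let l4 := PySem.List.sorted l4 (fun x => x) false
    if l1 == l3 then
      if l2 == l4 then true
      else false
    else false

-- ===== PORT B =====
def checkStrings_alt (s1 : String) (s2 : String) : Bool :=
  let counts : PySem.Dict (Int × Char) Int := PySem.Dict.empty
  let counts := (PySem.List.enumerate s1.toList).foldl
    (fun d p => d.insert (PySem.Int.mod p.1 2, p.2) (d.getD (PySem.Int.mod p.1 2, p.2) 0 + 1)) counts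
  let counts := (PySem.List.enumerate s2.toList).foldl
    (fun d p => d.insert (PySem.Int.mod p.1 2, p.2) (d.getD (PySem.Int.mod p.1 2, p.2) 0 - 1)) counts
  counts.values.all (fun v => v == 0)

-- ===== PRECONDITION & SPEC =====
def Spec_checkStrings (s1 : String) (s2 : String) (out : Bool) : Prop := out = checkStrings_alt s1 s2
instance (s1 : String) (s2 : String) (out : Bool) : Decidable (Spec_checkStrings s1 s2 out) := by unfold Spec_checkStrings; infer_instance

-- ===== CLAIM (what is proved, stated in full; the proofs are below) =====
def Claim_equal_checkStrings : Prop := ∀ (s1 : String) (s2 : String), Dom_checkStrings s1 s2 → Spec_checkStrings s1 s2 (checkStrings s1 s2)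

-- ===== LEMMAS AND PROOFS =====

-- (index parity, char) tagging of a string's characters; counts of these keys drive both proofs
def pvKeyed (t : List Char) : List (Int × Char) :=
  (PySem.List.enumerate t).map (fun p => (PySem.Int.mod p.1 2, p.2))

-- even- and odd-indexed characters, as A extracts them
def pvE (t : List Char) : List Char :=
  ((PySem.List.enumerate t).filter (fun q => PySem.Int.mod q.1 2 == 0)).map (·.2)
def pvO (t : List Char) : List Char :=
  ((PySem.List.enumerate t).filter (fun q => PySem.Int.mod q.1 2 == 1)).map (·.2)

lemma pv_filter_range (t : List Char) (b : Int) :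
    (List.filter (fun i => PySem.Int.mod i 2 == b) (PySem.List.pyRange 0 (PySem.List.len t))).map
        (fun i => PySem.List.pyGetD t i ' ')
      = ((PySem.List.enumerate t).filter (fun q => PySem.Int.mod q.1 2 == b)).map (·.2) := by
  rw [PySem.List.enumerate_eq_map_pyRange t ' ', List.filter_map, List.map_map]
  rfl

lemma pv_A_true_iff (s1 s2 : String) :
    checkStrings s1 s2 = true ↔
      s1 = s2 ∨ ((pvE s1.toList).Perm (pvE s2.toList) ∧ (pvO s1.toList).Perm (pvO s2.toList)) := by
  unfold checkStrings
  simp only [pv_filter_range]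
  by_cases h : s1 = s2
  · simp [h]
  · simp only [beq_iff_eq, h, if_false]
    split_ifs with h1 h2 <;>
      simp_all [PySem.List.sorted_id_eq_sorted_id_iff_perm, pvE, pvO]

lemma pv_tally_add (l : List (Int × Char)) (d : PySem.Dict (Int × Char) Int) (k : Int × Char) :
    (l.foldl (fun d p => d.insert (PySem.Int.mod p.1 2, p.2)
        (d.getD (PySem.Int.mod p.1 2, p.2) 0 + 1)) d).getD k 0
      = d.getD k 0 + ((l.map (fun p => (PySem.Int.mod p.1 2, p.2))).count k : Int) := by
  induction l generalizing d with
  | nil => simp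
  | cons p l ih =>
    simp only [List.foldl_cons, List.map_cons, ih, PySem.Dict.getD_insert, List.count_cons,
      beq_iff_eq]
    by_cases h : k = (PySem.Int.mod p.1 2, p.2)
    · rw [if_pos h, if_pos h.symm, h]; push_cast; ring
    · rw [if_neg h, if_neg (fun e => h e.symm)]; push_cast; ring

lemma pv_tally_sub (l : List (Int × Char)) (d : PySem.Dict (Int × Char) Int) (k : Int × Char) :
    (l.foldl (fun d p => d.insert (PySem.Int.mod p.1 2, p.2)
        (d.getD (PySem.Int.mod p.1 2, p.2) 0 - 1)) d).getD k 0
      = d.getD k 0 - ((l.map (fun p => (PySem.Int.mod p.1 2, p.2))).count k : Int) := by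
  induction l generalizing d with
  | nil => simp
  | cons p l ih =>
    simp only [List.foldl_cons, List.map_cons, ih, PySem.Dict.getD_insert, List.count_cons,
      beq_iff_eq]
    by_cases h : k = (PySem.Int.mod p.1 2, p.2)
    · rw [if_pos h, if_pos h.symm, h]; push_cast; ring
    · rw [if_neg h, if_neg (fun e => h e.symm)]; push_cast; ring

lemma pv_B_aux (t1 t2 : List Char) :
    ((((PySem.List.enumerate t2).foldl
        (fun d p => d.insert (PySem.Int.mod p.1 2, p.2) (d.getD (PySem.Int.mod p.1 2, p.2) 0 - 1))
        ((PySem.List.enumerate t1).foldl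
          (fun d p => d.insert (PySem.Int.mod p.1 2, p.2) (d.getD (PySem.Int.mod p.1 2, p.2) 0 + 1))
          (PySem.Dict.empty : PySem.Dict (Int × Char) Int))).values).all (fun v => v == 0)) = true
      ↔ ∀ k, (pvKeyed t1).count k = (pvKeyed t2).count k := by
  set key : Int × Char → Int × Char := fun p => (PySem.Int.mod p.1 2, p.2) with hkey
  set d1 := (PySem.List.enumerate t1).foldl
      (fun d p => d.insert (PySem.Int.mod p.1 2, p.2) (d.getD (PySem.Int.mod p.1 2, p.2) 0 + 1))
      (PySem.Dict.empty : PySem.Dict (Int × Char) Int) with hd1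
  set d2 := (PySem.List.enumerate t2).foldl
      (fun d p => d.insert (PySem.Int.mod p.1 2, p.2) (d.getD (PySem.Int.mod p.1 2, p.2) 0 - 1))
      d1 with hd2
  have hnd1 : d1.keys.Nodup := by
    rw [hd1]
    exact PySem.Dict.nodup_keys_foldl_insert_key (PySem.List.enumerate t1) key
      (fun d p => d.getD (key p) 0 + 1) _ PySem.Dict.nodup_keys_empty
  have hnd2 : d2.keys.Nodup := by
    rw [hd2]
    exact PySem.Dict.nodup_keys_foldl_insert_key (PySem.List.enumerate t2) key
      (fun d p => d.getD (key p) 0 - 1) _ hnd1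
  have hmem : ∀ k, k ∈ d2.keys ↔ k ∈ pvKeyed t1 ∨ k ∈ pvKeyed t2 := by
    intro k
    rw [hd2, PySem.Dict.keys_foldl_insert_key (PySem.List.enumerate t2) key
      (fun d p => d.getD (key p) 0 - 1) d1, PySem.Set.mem_update, hd1,
      PySem.Dict.keys_foldl_insert_key (PySem.List.enumerate t1) key
      (fun d p => d.getD (key p) 0 + 1) PySem.Dict.empty, PySem.Set.mem_update]
    simp [pvKeyed, hkey, PySem.Dict.keys_empty]
  have hget : ∀ k, d2.getD k 0
      = ((pvKeyed t1).count k : Int) - ((pvKeyed t2).count k : Int) := by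
    intro k
    rw [hd2, pv_tally_sub, hd1, pv_tally_add, PySem.Dict.getD_empty]
    simp [pvKeyed]
  rw [PySem.Dict.values_eq_map_keys d2 hnd2 0]
  simp only [List.all_eq_true, List.forall_mem_map, beq_iff_eq, hget]
  constructor
  · intro h k
    by_cases hk : k ∈ d2.keys
    · have := h k hk; omega
    · rw [hmem] at hk
      push Not at hk
      rw [List.count_eq_zero_of_not_mem hk.1, List.count_eq_zero_of_not_mem hk.2]
  · intro h k _
    rw [h k]; ring

lemma pv_B_true_iff (s1 s2 : String) :
    checkStrings_alt s1 s2 = true ↔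
      ∀ k, (pvKeyed s1.toList).count k = (pvKeyed s2.toList).count k := by
  exact pv_B_aux s1.toList s2.toList

lemma pv_count_keyed_zero (t : List Char) (c : Char) :
    (pvKeyed t).count ((0 : Int), c) = (pvE t).count c := by
  simp only [pvKeyed, pvE, List.count, List.countP_map, List.countP_filter]
  apply List.countP_congr
  intro q _
  simp [beq_iff_eq, Prod.ext_iff, Function.comp, and_comm]

lemma pv_count_keyed_one (t : List Char) (c : Char) :
    (pvKeyed t).count ((1 : Int), c) = (pvO t).count c := by
  simp only [pvKeyed, pvO, List.count, List.countP_map, List.countP_filter]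
  apply List.countP_congr
  intro q _
  simp [beq_iff_eq, Prod.ext_iff, Function.comp, and_comm]

lemma pv_count_keyed_other (t : List Char) (b : Int) (c : Char) (h0 : b ≠ 0) (h1 : b ≠ 1) :
    (pvKeyed t).count (b, c) = 0 := by
  simp only [pvKeyed, List.count, List.countP_map]
  rw [List.countP_eq_zero]
  intro q hq
  rw [PySem.List.mem_enumerate_iff] at hq
  obtain ⟨k, hk, rfl⟩ := hq
  simp only [Function.comp, zero_add, beq_iff_eq, Prod.ext_iff]
  intro ⟨e1, _⟩
  rw [PySem.Int.mod_eq_emod_of_pos (by norm_num)] at e1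
  omega

lemma pv_bridge (t1 t2 : List Char) :
    (∀ k, (pvKeyed t1).count k = (pvKeyed t2).count k) ↔
      (pvE t1).Perm (pvE t2) ∧ (pvO t1).Perm (pvO t2) := by
  constructor
  · intro h
    constructor
    · rw [List.perm_iff_count]
      intro c
      rw [← pv_count_keyed_zero, ← pv_count_keyed_zero, h]
    · rw [List.perm_iff_count]
      intro c
      rw [← pv_count_keyed_one, ← pv_count_keyed_one, h]
  · rintro ⟨he, ho⟩ ⟨b, c⟩
    by_cases hb0 : b = 0
    · subst hb0
      rw [pv_count_keyed_zero, pv_count_keyed_zero, he.count_eq]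
    · by_cases hb1 : b = 1
      · subst hb1
        rw [pv_count_keyed_one, pv_count_keyed_one, ho.count_eq]
      · rw [pv_count_keyed_other _ _ _ hb0 hb1, pv_count_keyed_other _ _ _ hb0 hb1]

-- ===== VERDICT (by name: the statement is the Claim_ definition above) =====
theorem checkStrings_spec : Claim_equal_checkStrings := by
  intro s1 s2 _
  unfold Spec_checkStrings
  rw [Bool.eq_iff_iff, pv_A_true_iff, pv_B_true_iff, pv_bridge]
  constructor
  · rintro (rfl | h)
    · exact ⟨List.Perm.refl _, List.Perm.refl _⟩
    · exact h
  · exact Or.inr
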